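-- pv_equiv track=rewrite | github.com/rocadenis/Python | lab2.py | ex_12
-- ===== SOURCE A (Python) =====
-- def ex_12(words):
--     rhyme_dict = {}
--
--     for word in words:
--         rhyme_key = word[-2:]  # ia ultimele doua caractere
--         if rhyme_key in rhyme_dict:
--             rhyme_dict[rhyme_key].append(word)
--         else: # daca cheia nu exista fac o intrare noua in disctionar
--             rhyme_dict[rhyme_key] = [word]
--
--     grouped_rhymes = list(rhyme_dict.values())
--
--     return grouped_rhymes
-- ===== SOURCE B (Python) =====
-- def ex_12(words):
--     keys = []
--     for word in words:
--         rhyme_key = word[-2:]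
--         if rhyme_key not in keys:
--             keys.append(rhyme_key)
--     return [[word for word in words if word[-2:] == key] for key in keys]
-- ===== Notes on version B (the rewrite author's own statement) =====
-- stated objective: alternative
-- what changed: Replaces A's single-pass hash-table bucketing (dict of key -> growing list) by a two-phase strategy: first collect the distinct rhyme keys in first-appearance order, then build each group by filtering the whole word list per key.
import Mathlib
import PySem

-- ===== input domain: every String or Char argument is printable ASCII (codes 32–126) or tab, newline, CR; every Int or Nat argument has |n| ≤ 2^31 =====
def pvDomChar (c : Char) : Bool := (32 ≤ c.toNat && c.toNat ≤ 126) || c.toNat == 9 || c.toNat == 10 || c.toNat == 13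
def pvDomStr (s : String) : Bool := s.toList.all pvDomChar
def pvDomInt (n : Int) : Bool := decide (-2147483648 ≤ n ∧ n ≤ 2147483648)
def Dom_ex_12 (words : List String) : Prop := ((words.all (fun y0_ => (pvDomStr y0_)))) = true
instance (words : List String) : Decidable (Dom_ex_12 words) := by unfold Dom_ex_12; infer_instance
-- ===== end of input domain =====

-- B replaces A's one-pass dict bucketing by collect-distinct-keys-then-filter-per-key (same result, alternative decomposition).

-- word[-2:]
def pvLast2 (s : String) : String := PySem.Str.slice s (some (-2)) none

-- ===== PORT A =====
def ex_12 (words : List String) : List (List String) :=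
  (words.foldl (fun d word =>
      let rhyme_key := pvLast2 word
      if d.contains rhyme_key then
        d.modify rhyme_key [] (fun l => l ++ [word])   -- rhyme_dict[rhyme_key].append(word)
      else
        d.insert rhyme_key [word])
    PySem.Dict.empty).values

-- ===== PORT B =====
def ex_12_alt (words : List String) : List (List String) :=
  (words.foldl (fun keys word =>
      if pvLast2 word ∈ keys then keys else keys ++ [pvLast2 word]) []).map
    (fun key => words.filter (fun word => pvLast2 word == key))

-- ===== PRECONDITION & SPEC =====
def Spec_ex_12 (words : List String) (out : List (List String)) : Prop := out = ex_12_alt words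
instance (words : List String) (out : List (List String)) : Decidable (Spec_ex_12 words out) := by unfold Spec_ex_12; infer_instance

-- ===== CLAIM (what is proved, stated in full; the proofs are below) =====
def Claim_equal_ex_12 : Prop := ∀ (words : List String), Dom_ex_12 words → Spec_ex_12 words (ex_12 words)

-- ===== LEMMAS AND PROOFS =====

-- A's branch (append vs. fresh entry) is exactly Dict.modify with default []
theorem ex12_step_eq_modify (d : PySem.Dict String (List String)) (w : String) :
    (if d.contains (pvLast2 w) then d.modify (pvLast2 w) [] (fun l => l ++ [w])
     else d.insert (pvLast2 w) [w])
      = d.modify (pvLast2 w) [] (fun l => l ++ [w]) := by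
  by_cases h : d.contains (pvLast2 w)
  · simp [h]
  · simp only [Bool.not_eq_true] at h
    simp [h, PySem.Dict.modify, PySem.Dict.getD_of_not_contains d _ h]

-- A's loop, rewritten as a pure modify-fold
theorem ex12_fold_eq (words : List String) :
    ex_12 words
      = (words.foldl (fun d w => d.modify (pvLast2 w) [] (fun l => l ++ [w]))
          PySem.Dict.empty).values := by
  unfold ex_12
  congr 1
  apply PySem.List.foldl_congr_mem
  intro d w _
  exact ex12_step_eq_modify d w

theorem ex_12_spec_aux (words : List String) : ex_12 words = ex_12_alt words := by
  rw [ex12_fold_eq]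
  set F := words.foldl (fun d w => d.modify (pvLast2 w) [] (fun l => l ++ [w]))
    PySem.Dict.empty with hF
  have hnd : F.keys.Nodup := by
    exact PySem.Dict.nodup_keys_foldl_modify_key words pvLast2 []
      (fun d w => fun l => l ++ [w]) PySem.Dict.empty (by simp)
  have hkeys : F.keys = PySem.Set.ofList (words.map pvLast2) := by
    rw [hF, PySem.Dict.keys_foldl_modify_key]
    simp [PySem.Set.update_nil_left]
  have hgetD : ∀ k, F.getD k [] = words.filter (fun w => pvLast2 w == k) := by
    intro k
    have hmap : F = (words.map (fun w => (pvLast2 w, w))).foldl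
        (fun d p => d.modify p.1 [] (fun l => l ++ [p.2])) PySem.Dict.empty := by
      rw [hF, List.foldl_map]
    rw [hmap, PySem.Dict.getD_foldl_modify_append]
    simp [List.filter_map, Function.comp_def]
  rw [PySem.Dict.values_eq_map_keys F hnd [], hkeys]
  unfold ex_12_alt
  have hbkeys : (words.foldl (fun keys w =>
      if pvLast2 w ∈ keys then keys else keys ++ [pvLast2 w]) ([] : List String))
        = PySem.Set.ofList (words.map pvLast2) := by
    rw [PySem.List.foldl_congr_mem words _ (fun s w => PySem.Set.add s (pvLast2 w)) []
      (by intro s w _; simp [PySem.Set.add_eq_ite]),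
      ← PySem.Set.update_map_eq_foldl_add, PySem.Set.update_nil_left]
  rw [hbkeys]
  apply List.map_congr_left
  intro k _
  exact hgetD k

-- ===== VERDICT (by name: the statement is the Claim_ definition above) =====
theorem ex_12_spec : Claim_equal_ex_12 := by
  intro words _
  unfold Spec_ex_12
  exact ex_12_spec_aux words
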